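-- pv_equiv track=rewrite | github.com/Huston1992/quickpredict-ai | database.py | calculate_best_streak
-- ===== SOURCE A (Python) =====
-- def calculate_best_streak(predictions):
--     """Calculate best prediction streak"""
--     current_streak = 0
--     best_streak = 0
--     for p in predictions:
--         if p.get('correct', False):
--             current_streak += 1
--         else:
--             if current_streak > best_streak:
--                 best_streak = current_streak
--             current_streak = 0
--     if current_streak > best_streak:
--         best_streak = current_streak
--     return best_streak
-- ===== SOURCE B (Python) =====
-- from itertools import groupby
--
--
-- def calculate_best_streak(predictions):
--     """Calculate best prediction streak"""
--     best = 0
--     for key, group in groupby(predictions, key=lambda p: bool(p.get('correct', False))):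
--         if key:
--             best = max(best, sum(1 for _ in group))
--     return best
-- ===== Notes on version B (the rewrite author's own statement) =====
-- stated objective: idiomatic
-- what changed: Replaced the running-counter-with-reset scan by itertools.groupby: partition the sequence into maximal runs of equal correctness and take the maximum length of the True runs.
import Mathlib
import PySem

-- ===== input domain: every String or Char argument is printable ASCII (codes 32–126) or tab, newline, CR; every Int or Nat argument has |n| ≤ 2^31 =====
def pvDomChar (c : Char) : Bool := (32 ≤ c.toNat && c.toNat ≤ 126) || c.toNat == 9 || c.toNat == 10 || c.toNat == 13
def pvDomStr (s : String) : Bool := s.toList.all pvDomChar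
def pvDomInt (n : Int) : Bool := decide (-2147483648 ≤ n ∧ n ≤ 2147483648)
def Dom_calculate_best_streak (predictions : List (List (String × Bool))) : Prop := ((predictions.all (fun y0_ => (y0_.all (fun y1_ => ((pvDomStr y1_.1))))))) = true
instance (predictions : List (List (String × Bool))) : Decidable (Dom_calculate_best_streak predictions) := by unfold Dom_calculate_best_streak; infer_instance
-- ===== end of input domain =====

-- B replaces A's running-counter-with-reset scan by a groupby-style split of the
-- correctness keys into maximal runs, taking the max length of the True runs (idiomatic).

-- ===== PORT A =====
def calculate_best_streak (predictions : List (List (String × Bool))) : Int :=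
  let s := predictions.foldl
    (fun (s : Int × Int) p =>
      if (PySem.Dict.mk p).getD "correct" false then (s.1 + 1, s.2)
      else (0, if s.1 > s.2 then s.1 else s.2))
    (0, 0)
  if s.1 > s.2 then s.1 else s.2

-- ===== PORT B =====
-- groupby over the correctness keys: consume one maximal run at a time
-- (takeWhile/dropWhile = the maximal group groupby yields); True groups contribute
-- their length, max'ed in; False groups are skipped.
def pvBestRun : List Bool → Int
  | [] => 0
  | false :: rest => pvBestRun rest
  | true :: rest =>
      max (((rest.takeWhile (· == true)).length + 1 : Nat) : Int)
        (pvBestRun (rest.dropWhile (· == true)))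
termination_by bs => bs.length
decreasing_by
  all_goals simp only [List.length_cons]
  · omega
  · exact Nat.lt_succ_of_le (List.length_dropWhile_le _ _)

def calculate_best_streak_alt (predictions : List (List (String × Bool))) : Int :=
  pvBestRun (predictions.map (fun p => (PySem.Dict.mk p).getD "correct" false))

-- ===== PRECONDITION & SPEC =====
def Spec_calculate_best_streak (predictions : List (List (String × Bool))) (out : Int) : Prop := out = calculate_best_streak_alt predictions
instance (predictions : List (List (String × Bool))) (out : Int) : Decidable (Spec_calculate_best_streak predictions out) := by unfold Spec_calculate_best_streak; infer_instance

-- ===== CLAIM (what is proved, stated in full; the proofs are below) =====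
def Claim_equal_calculate_best_streak : Prop := ∀ (predictions : List (List (String × Bool))), Dom_calculate_best_streak predictions → Spec_calculate_best_streak predictions (calculate_best_streak predictions)

-- ===== LEMMAS AND PROOFS =====

-- reference function: best streak of a boolean key sequence given current run length c
def pvH : List Bool → Int → Int
  | [], c => c
  | true :: bs, c => pvH bs (c + 1)
  | false :: bs, c => max c (pvH bs 0)

-- A's loop from state (c, b), finished off, equals max b (pvH keys c)
lemma pvA_loop (ps : List (List (String × Bool))) : ∀ (c b : Int),
    (let s := ps.foldl
        (fun (s : Int × Int) p =>
          if (PySem.Dict.mk p).getD "correct" false then (s.1 + 1, s.2)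
          else (0, if s.1 > s.2 then s.1 else s.2))
        (c, b)
     if s.1 > s.2 then s.1 else s.2)
      = max b (pvH (ps.map (fun p => (PySem.Dict.mk p).getD "correct" false)) c) := by
  induction ps with
  | nil =>
      intro c b
      simp only [List.foldl_nil, List.map_nil, pvH]
      omega
  | cons p ps ih =>
      intro c b
      simp only [List.foldl_cons, List.map_cons]
      cases hk : (PySem.Dict.mk p).getD "correct" false with
      | true => simpa [pvH] using ih (c + 1) b
      | false =>
          have h2 := ih 0 (if c > b then c else b)
          simp only [pvH, Bool.false_eq_true, if_false]
          rw [h2]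
          omega

lemma pvH_ge (bs : List Bool) : ∀ c : Int, c ≤ pvH bs c := by
  induction bs with
  | nil => intro c; simp [pvH]
  | cons k bs ih =>
      intro c
      cases k with
      | true => exact le_trans (by omega) (ih (c + 1))
      | false => simp [pvH]

-- a leading all-true block just raises the current counter
lemma pvH_true_prefix (r : List Bool) (t : List Bool) (ht : ∀ x ∈ t, x = true) :
    ∀ c : Int, pvH (t ++ r) c = pvH r (c + t.length) := by
  induction t with
  | nil => intro c; simp
  | cons x t ih =>
      intro c
      have hx : x = true := ht x (by simp)
      subst hx
      have h1 := ih (fun x hx => ht x (by simp [hx])) (c + 1)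
      simp only [List.cons_append, pvH, h1, List.length_cons]
      congr 1
      push_cast
      ring

-- if the list does not start with true, pvH splits off max c
lemma pvH_not_true_head (r : List Bool) (hr : r.head? ≠ some true) (c : Int) (hc : 0 ≤ c) :
    pvH r c = max c (pvH r 0) := by
  cases r with
  | nil => simp [pvH]; omega
  | cons x r =>
      cases x with
      | true => simp at hr
      | false =>
          have h0 : (0 : Int) ≤ pvH r 0 := pvH_ge r 0
          simp only [pvH]
          omega

lemma pvDropWhile_head (l : List Bool) : (l.dropWhile (· == true)).head? ≠ some true := by
  induction l with
  | nil => simp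
  | cons x xs ih =>
      cases x with
      | true => simpa [List.dropWhile_cons] using ih
      | false => simp

lemma pvBestRun_eq_pvH (bs : List Bool) : pvBestRun bs = pvH bs 0 := by
  induction bs using pvBestRun.induct with
  | case1 => simp [pvBestRun, pvH]
  | case2 rest ih =>
      simp only [pvBestRun, pvH, ih]
      have := pvH_ge rest 0
      omega
  | case3 rest ih =>
      have ht : ∀ x ∈ rest.takeWhile (· == true), x = true := by
        intro x hx
        simpa using List.mem_takeWhile_imp hx
      have hsplit : rest = rest.takeWhile (· == true) ++ rest.dropWhile (· == true) :=
        (List.takeWhile_append_dropWhile).symm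
      have h1 : pvH (true :: rest) 0
          = pvH (rest.dropWhile (· == true)) (1 + (rest.takeWhile (· == true)).length) := by
        conv_lhs => rw [show pvH (true :: rest) 0 = pvH rest 1 from rfl, hsplit]
        exact pvH_true_prefix _ _ ht 1
      rw [pvBestRun, ih, h1, pvH_not_true_head _ (pvDropWhile_head rest)
        (1 + ((rest.takeWhile (· == true)).length : Int)) (by positivity)]
      push_cast
      omega

-- ===== VERDICT (by name: the statement is the Claim_ definition above) =====
theorem calculate_best_streak_spec : Claim_equal_calculate_best_streak := by
  intro predictions _
  unfold Spec_calculate_best_streak calculate_best_streak calculate_best_streak_alt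
  rw [pvBestRun_eq_pvH, pvA_loop predictions 0 0]
  have := pvH_ge (predictions.map (fun p => (PySem.Dict.mk p).getD "correct" false)) 0
  omega
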